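-- pv_equiv track=rewrite | github.com/WaiHein-REISys/AI-Migration-Tool | wizard/detector.py | _detect_service_patterns
-- ===== SOURCE A (Python) =====
-- def _detect_service_patterns(files: list[str]) -> list[str]:
--     patterns = []
--     if any(f.endswith(".service.ts") for f in files):
--         patterns.append("Angular @Injectable() services (*.service.ts)")
--     if any("_service.py" in f for f in files):
--         patterns.append("Python service modules (*_service.py)")
--     if any("_repository.py" in f for f in files):
--         patterns.append("Repository pattern (*_repository.py)")
--     if any("_routes.py" in f for f in files):
--         patterns.append("Flask Blueprint routes (*_routes.py)")
--     if any("fetcher" in f.lower() or "api.ts" in f.lower() for f in files):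
--         patterns.append("Typed async fetchers (api.ts / fetcher functions)")
--     return patterns
-- ===== SOURCE B (Python) =====
-- def _detect_service_patterns(files: list[str]) -> list[str]:
--     ng = py_svc = repo = routes = fetch = False
--     for f in files:
--         ng = ng or f.endswith(".service.ts")
--         py_svc = py_svc or "_service.py" in f
--         repo = repo or "_repository.py" in f
--         routes = routes or "_routes.py" in f
--         fetch = fetch or "fetcher" in f.lower() or "api.ts" in f.lower()
--     patterns = []
--     if ng:
--         patterns.append("Angular @Injectable() services (*.service.ts)")
--     if py_svc:
--         patterns.append("Python service modules (*_service.py)")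
--     if repo:
--         patterns.append("Repository pattern (*_repository.py)")
--     if routes:
--         patterns.append("Flask Blueprint routes (*_routes.py)")
--     if fetch:
--         patterns.append("Typed async fetchers (api.ts / fetcher functions)")
--     return patterns
-- ===== Notes on version B (the rewrite author's own statement) =====
-- stated objective: alternative
-- what changed: B replaces A's five separate any(...) scans over files with a single pass that accumulates five boolean flags, then emits the labels guarded by the flags in the original order.
import Mathlib
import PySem

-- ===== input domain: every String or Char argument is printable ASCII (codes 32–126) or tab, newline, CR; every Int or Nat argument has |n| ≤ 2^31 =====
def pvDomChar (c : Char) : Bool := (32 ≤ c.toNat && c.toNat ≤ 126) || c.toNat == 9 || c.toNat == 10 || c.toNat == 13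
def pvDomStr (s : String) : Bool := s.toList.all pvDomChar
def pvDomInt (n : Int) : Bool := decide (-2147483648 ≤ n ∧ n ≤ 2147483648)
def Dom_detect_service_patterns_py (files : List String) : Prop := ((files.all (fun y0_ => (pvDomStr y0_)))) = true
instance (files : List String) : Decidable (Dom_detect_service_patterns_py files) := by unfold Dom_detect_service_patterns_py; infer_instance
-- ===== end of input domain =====

-- B replaces A's five separate any(...) scans over files with a single accumulating pass; same labels, same order.

-- ===== PORT A =====
def detect_service_patterns_py (files : List String) : List String :=
  let patterns : List String := []
  let patterns := if files.any (fun f => PySem.Str.endswith f ".service.ts")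
    then patterns ++ ["Angular @Injectable() services (*.service.ts)"] else patterns
  let patterns := if files.any (fun f => PySem.Str.isIn "_service.py" f)
    then patterns ++ ["Python service modules (*_service.py)"] else patterns
  let patterns := if files.any (fun f => PySem.Str.isIn "_repository.py" f)
    then patterns ++ ["Repository pattern (*_repository.py)"] else patterns
  let patterns := if files.any (fun f => PySem.Str.isIn "_routes.py" f)
    then patterns ++ ["Flask Blueprint routes (*_routes.py)"] else patterns
  let patterns := if files.any (fun f => PySem.Str.isIn "fetcher" (PySem.Str.lower f) || PySem.Str.isIn "api.ts" (PySem.Str.lower f))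
    then patterns ++ ["Typed async fetchers (api.ts / fetcher functions)"] else patterns
  patterns

-- ===== PORT B =====
def detect_service_patterns_py_alt (files : List String) : List String :=
  let flags := files.foldl
    (fun (s : Bool × Bool × Bool × Bool × Bool) f =>
      (s.1 || PySem.Str.endswith f ".service.ts",
       s.2.1 || PySem.Str.isIn "_service.py" f,
       s.2.2.1 || PySem.Str.isIn "_repository.py" f,
       s.2.2.2.1 || PySem.Str.isIn "_routes.py" f,
       s.2.2.2.2 || PySem.Str.isIn "fetcher" (PySem.Str.lower f) || PySem.Str.isIn "api.ts" (PySem.Str.lower f)))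
    (false, false, false, false, false)
  (if flags.1 then ["Angular @Injectable() services (*.service.ts)"] else []) ++
  (if flags.2.1 then ["Python service modules (*_service.py)"] else []) ++
  (if flags.2.2.1 then ["Repository pattern (*_repository.py)"] else []) ++
  (if flags.2.2.2.1 then ["Flask Blueprint routes (*_routes.py)"] else []) ++
  (if flags.2.2.2.2 then ["Typed async fetchers (api.ts / fetcher functions)"] else [])

-- ===== PRECONDITION & SPEC =====
def Spec_detect_service_patterns_py (files : List String) (out : List String) : Prop := out = detect_service_patterns_py_alt files
instance (files : List String) (out : List String) : Decidable (Spec_detect_service_patterns_py files out) := by unfold Spec_detect_service_patterns_py; infer_instance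

-- ===== CLAIM (what is proved, stated in full; the proofs are below) =====
def Claim_equal_detect_service_patterns_py : Prop := ∀ (files : List String), Dom_detect_service_patterns_py files → Spec_detect_service_patterns_py files (detect_service_patterns_py files)

-- ===== LEMMAS AND PROOFS =====

-- The five-flag fold computes, componentwise, the disjunction of the five `any`s.
theorem pv_fold_flags (files : List String) (b1 b2 b3 b4 b5 : Bool) :
    files.foldl
      (fun (s : Bool × Bool × Bool × Bool × Bool) f =>
        (s.1 || PySem.Str.endswith f ".service.ts",
         s.2.1 || PySem.Str.isIn "_service.py" f,
         s.2.2.1 || PySem.Str.isIn "_repository.py" f,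
         s.2.2.2.1 || PySem.Str.isIn "_routes.py" f,
         s.2.2.2.2 || PySem.Str.isIn "fetcher" (PySem.Str.lower f) || PySem.Str.isIn "api.ts" (PySem.Str.lower f)))
      (b1, b2, b3, b4, b5) =
    (b1 || files.any (fun f => PySem.Str.endswith f ".service.ts"),
     b2 || files.any (fun f => PySem.Str.isIn "_service.py" f),
     b3 || files.any (fun f => PySem.Str.isIn "_repository.py" f),
     b4 || files.any (fun f => PySem.Str.isIn "_routes.py" f),
     b5 || files.any (fun f => PySem.Str.isIn "fetcher" (PySem.Str.lower f) || PySem.Str.isIn "api.ts" (PySem.Str.lower f))) := by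
  induction files generalizing b1 b2 b3 b4 b5 with
  | nil => simp
  | cons f fs ih =>
    simp only [List.foldl_cons]
    rw [ih]
    simp [Bool.or_assoc]

-- ===== VERDICT (by name: the statement is the Claim_ definition above) =====
theorem detect_service_patterns_py_spec : Claim_equal_detect_service_patterns_py := by
  intro files _
  show _ = _
  unfold detect_service_patterns_py detect_service_patterns_py_alt
  rw [pv_fold_flags]
  simp only [Bool.false_or]
  split_ifs <;> rfl
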